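-- pv_equiv track=rewrite | github.com/alago1/aoc-2023 | day14/14.py | part1
-- ===== SOURCE A (Python) =====
-- def part1(grid):
--     s = 0
--
--     for c in range(len(grid[0])):
--         pivot = -1
--         pivot_count = 0
--         for r in range(len(grid)):
--             if grid[r][c] == '#':
--                 pivot_count = 0
--                 pivot = r
--
--             if grid[r][c] == 'O':
--                 s += len(grid) - pivot_count - pivot - 1
--                 pivot_count += 1
--
--     return s
-- ===== SOURCE B (Python) =====
-- def part1(grid):
--     n = len(grid)
--     total = 0
--     for c in range(len(grid[0])):
--         # walk the column as '#'-delimited segments: the k rocks of a segment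
--         # starting at row `start` settle on rows start..start+k-1, contributing
--         # k*(n-start) - k*(k-1)//2 in one arithmetic-series block.
--         start = 0
--         k = 0
--         for r, row in enumerate(grid):
--             if row[c] == '#':
--                 total += k * (n - start) - k * (k - 1) // 2
--                 start = r + 1
--                 k = 0
--             elif row[c] == 'O':
--                 k += 1
--         total += k * (n - start) - k * (k - 1) // 2
--     return total
-- ===== Notes on version B (the rewrite author's own statement) =====
-- stated objective: alternative
-- what changed: B groups each column's rocks by '#'-delimited segments and adds one closed arithmetic-series block k*(n-start)-k*(k-1)//2 per segment, instead of A's per-rock pivot/pivot_count accumulation.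
import Mathlib
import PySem

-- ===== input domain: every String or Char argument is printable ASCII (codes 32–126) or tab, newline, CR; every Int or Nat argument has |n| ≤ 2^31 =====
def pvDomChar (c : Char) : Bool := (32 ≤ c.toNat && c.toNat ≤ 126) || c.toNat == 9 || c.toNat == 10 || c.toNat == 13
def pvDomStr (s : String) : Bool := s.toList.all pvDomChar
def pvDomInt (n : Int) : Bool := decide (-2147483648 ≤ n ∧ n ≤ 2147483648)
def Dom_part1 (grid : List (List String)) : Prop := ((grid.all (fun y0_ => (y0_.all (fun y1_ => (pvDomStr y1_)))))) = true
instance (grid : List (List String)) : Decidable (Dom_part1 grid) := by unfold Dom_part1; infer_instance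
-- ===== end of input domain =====

-- B replaces A's per-rock pivot/pivot_count accumulation by per-segment counting
-- with a closed arithmetic-series block formula (objective: alternative decomposition).

-- ===== PORT A =====
-- state (s, pivot, pivot_count); cell access via pyGetD (Pre_ guarantees it is in range)
def part1StepA (grid : List (List String)) (c : Int) (st : Int × Int × Int) (r : Int) :
    Int × Int × Int :=
  let cell := PySem.List.pyGetD (PySem.List.pyGetD grid r []) c ""
  let st := if cell = "#" then (st.1, r, (0 : Int)) else st
  if cell = "O" then
    (st.1 + ((PySem.List.len grid) - st.2.2 - st.2.1 - 1), st.2.1, st.2.2 + 1)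
  else st

def part1 (grid : List (List String)) : Int :=
  let n := PySem.List.len grid
  let w := PySem.List.len (PySem.List.pyGetD grid 0 [])
  (PySem.List.pyRange 0 w 1).foldl
    (fun s c => ((PySem.List.pyRange 0 n 1).foldl (part1StepA grid c) (s, -1, 0)).1) 0

-- ===== PORT B =====
-- state (total, start, k); on '#': flush the segment's block formula and reset
def part1StepB (grid : List (List String)) (c : Int) (st : Int × Int × Int)
    (p : Int × List String) : Int × Int × Int :=
  let cell := PySem.List.pyGetD p.2 c ""
  if cell = "#" then
    (st.1 + (st.2.2 * ((PySem.List.len grid) - st.2.1)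
        - PySem.Int.floordiv (st.2.2 * (st.2.2 - 1)) 2), p.1 + 1, (0 : Int))
  else if cell = "O" then (st.1, st.2.1, st.2.2 + 1)
  else st

def part1_alt (grid : List (List String)) : Int :=
  let n := PySem.List.len grid
  let w := PySem.List.len (PySem.List.pyGetD grid 0 [])
  (PySem.List.pyRange 0 w 1).foldl
    (fun total c =>
      let res := (PySem.List.enumerate grid).foldl (part1StepB grid c) (total, 0, 0)
      res.1 + (res.2.2 * (n - res.2.1) - PySem.Int.floordiv (res.2.2 * (res.2.2 - 1)) 2)) 0

-- ===== PRECONDITION & SPEC =====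
-- Pre_ excludes exactly the inputs on which Python A raises IndexError:
-- the empty grid (grid[0]) and ragged grids with a row shorter than row 0 (grid[r][c]).
def Pre_part1 (grid : List (List String)) : Prop :=
  grid ≠ [] ∧ ∀ row ∈ grid, (grid.headD []).length ≤ row.length
instance (grid : List (List String)) : Decidable (Pre_part1 grid) := by
  unfold Pre_part1; infer_instance
def pvWitness_part1 : List (List String) :=
  [["O", ".", "#"], ["#", "O", "O"], [".", "O", "."]]
def Spec_part1 (grid : List (List String)) (out : Int) : Prop := out = part1_alt grid
instance (grid : List (List String)) (out : Int) : Decidable (Spec_part1 grid out) := by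
  unfold Spec_part1; infer_instance

-- ===== CLAIM (what is proved, stated in full; the proofs are below) =====
def Claim_equal_part1 : Prop :=
  ∀ (grid : List (List String)), Dom_part1 grid → Pre_part1 grid →
    Spec_part1 grid (part1 grid)

-- ===== LEMMAS AND PROOFS =====

-- Δ of consecutive triangular numbers, with Python floor division
lemma floordiv_tri_step (k : Int) :
    PySem.Int.floordiv ((k + 1) * k) 2 = PySem.Int.floordiv (k * (k - 1)) 2 + k := by
  obtain ⟨m, hm | hm⟩ := Int.even_or_odd' k <;> subst hm
  · have h1 : PySem.Int.floordiv ((2 * m + 1) * (2 * m)) 2 = (2 * m + 1) * m :=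
      (PySem.Int.floordiv_eq_iff_of_pos (by omega)).mpr ⟨by nlinarith, by nlinarith⟩
    have h2 : PySem.Int.floordiv ((2 * m) * (2 * m - 1)) 2 = m * (2 * m - 1) :=
      (PySem.Int.floordiv_eq_iff_of_pos (by omega)).mpr ⟨by nlinarith, by nlinarith⟩
    rw [h1, h2]; ring
  · have h1 : PySem.Int.floordiv ((2 * m + 1 + 1) * (2 * m + 1)) 2 = (m + 1) * (2 * m + 1) :=
      (PySem.Int.floordiv_eq_iff_of_pos (by omega)).mpr ⟨by nlinarith, by nlinarith⟩
    have h2 : PySem.Int.floordiv ((2 * m + 1) * (2 * m + 1 - 1)) 2 = (2 * m + 1) * m :=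
      (PySem.Int.floordiv_eq_iff_of_pos (by omega)).mpr ⟨by nlinarith, by nlinarith⟩
    rw [h1, h2]; ring

-- the relation between A's state (s, pivot, pcount) and B's state (total, start, k)
def part1Rel (n : Int) (a b : Int × Int × Int) : Prop :=
  a.1 = b.1 + (b.2.2 * (n - b.2.1) - PySem.Int.floordiv (b.2.2 * (b.2.2 - 1)) 2)
    ∧ a.2.1 = b.2.1 - 1 ∧ a.2.2 = b.2.2

-- one row step preserves the relation
lemma part1Rel_step (grid : List (List String)) (c r : Int) (a b : Int × Int × Int)
    (h : part1Rel (PySem.List.len grid) a b) :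
    part1Rel (PySem.List.len grid) (part1StepA grid c a r)
      (part1StepB grid c b (r, PySem.List.pyGetD grid r [])) := by
  obtain ⟨sA, pA, kA⟩ := a
  obtain ⟨sB, stB, kB⟩ := b
  obtain ⟨h1, h2, h3⟩ := h
  simp only at h1 h2 h3
  subst h1 h2 h3
  unfold part1Rel part1StepA part1StepB
  by_cases hh : PySem.List.pyGetD (PySem.List.pyGetD grid r []) c "" = "#"
  · have hno : ¬ ("#" : String) = "O" := by decide
    simp only [hh, reduceIte, if_neg hno]
    refine ⟨?_, by omega, trivial⟩
    have h0 : PySem.Int.floordiv ((0 : Int) * (0 - 1)) 2 = 0 := by decide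
    rw [h0]; ring
  · by_cases ho : PySem.List.pyGetD (PySem.List.pyGetD grid r []) c "" = "O"
    · have hno : ¬ ("O" : String) = "#" := by decide
      simp only [ho, reduceIte, if_neg hno]
      refine ⟨?_, trivial, trivial⟩
      have heq : kA + 1 - 1 = kA := by omega
      rw [heq, floordiv_tri_step kA]
      ring
    · simp [hh, ho]

-- the relation is preserved along any list of rows (B's enumerate rewritten below)
lemma part1Rel_foldl (grid : List (List String)) (c : Int) (l : List Int)
    (a b : Int × Int × Int) (h : part1Rel (PySem.List.len grid) a b) :
    part1Rel (PySem.List.len grid)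
      (l.foldl (part1StepA grid c) a)
      (l.foldl (fun st r => part1StepB grid c st (r, PySem.List.pyGetD grid r [])) b) := by
  induction l generalizing a b with
  | nil => exact h
  | cons x xs ih => exact ih _ _ (part1Rel_step grid c x a b h)

-- per column, the two inner computations agree for every outer accumulator
lemma part1_col (grid : List (List String)) (c s : Int) :
    ((PySem.List.pyRange 0 (PySem.List.len grid) 1).foldl (part1StepA grid c) (s, -1, 0)).1
      = (let res := (PySem.List.enumerate grid).foldl (part1StepB grid c) (s, 0, 0)
         res.1 + (res.2.2 * ((PySem.List.len grid) - res.2.1)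
            - PySem.Int.floordiv (res.2.2 * (res.2.2 - 1)) 2)) := by
  have h0 : PySem.Int.floordiv ((0 : Int) * (0 - 1)) 2 = 0 := by decide
  have hinit : part1Rel (PySem.List.len grid) (s, -1, 0) (s, 0, 0) := by
    refine ⟨?_, by norm_num, rfl⟩
    show s = s + (0 * (PySem.List.len grid - 0) - PySem.Int.floordiv (0 * (0 - 1)) 2)
    rw [h0]; ring
  obtain ⟨h1, h2, h3⟩ := part1Rel_foldl grid c
    (PySem.List.pyRange 0 (PySem.List.len grid) 1) (s, -1, 0) (s, 0, 0) hinit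
  have he := PySem.List.enumerate_eq_map_pyRange grid ([] : List String)
  show ((PySem.List.pyRange 0 (PySem.List.len grid) 1).foldl (part1StepA grid c) (s, -1, 0)).1
      = ((PySem.List.enumerate grid).foldl (part1StepB grid c) (s, 0, 0)).1
        + (((PySem.List.enumerate grid).foldl (part1StepB grid c) (s, 0, 0)).2.2
            * ((PySem.List.len grid)
              - ((PySem.List.enumerate grid).foldl (part1StepB grid c) (s, 0, 0)).2.1)
          - PySem.Int.floordiv
              (((PySem.List.enumerate grid).foldl (part1StepB grid c) (s, 0, 0)).2.2
                * (((PySem.List.enumerate grid).foldl (part1StepB grid c) (s, 0, 0)).2.2 - 1)) 2)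
  simp only [he, List.foldl_map]
  exact h1

-- ===== VERDICT (by name: the statement is the Claim_ definition above) =====
theorem part1_spec : Claim_equal_part1 := by
  intro grid _ _
  show part1 grid = part1_alt grid
  unfold part1 part1_alt
  apply PySem.List.foldl_congr_mem
  intro acc x _
  exact part1_col grid x acc
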